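-- pv_equiv track=rewrite | github.com/stasptkk-cpu/free_knots | functions.py | check_term_isomorphism
-- ===== SOURCE A (Python) =====
-- import itertools
--
-- def find_canonical_cyclic_form(diagram):
--     """
--     Находит каноническую циклическую форму диаграммы.
--
--     Параметры:
--     ----------
--     diagram : list
--         Хордовая диаграмма
--
--     Возвращает:
--     -----------
--     list
--         Каноническое представление диаграммы
--     """
--     if not diagram:
--         return []
--
--     all_representations = []
--     diagram_length = len(diagram)
--
--     for shift_amount in range(diagram_length):
--         shifted = diagram[shift_amount:] + diagram[:shift_amount]
--         all_representations.append(tuple(shifted))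
--
--     mirror_image = diagram[::-1]
--     for shift_amount in range(diagram_length):
--         shifted_mirror = mirror_image[shift_amount:] + mirror_image[:shift_amount]
--         all_representations.append(tuple(shifted_mirror))
--
--     canonical_form = min(all_representations)
--     return list(canonical_form)
--
-- def check_term_isomorphism(term_a, term_b, existing_correspondence=None):
--     """
--     Проверяет изоморфность двух слагаемых скобки четности.
--
--     Параметры:
--     ----------
--     term_a : list
--         Первое слагаемое
--     term_b : list
--         Второе слагаемое
--     existing_correspondence : dict, optional
--         Существующее частичное соответствие между хордами
--
--     Возвращает:
--     -----------
--     bool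
--         True если слагаемые изоморфны, иначе False
--     """
--     if len(term_a) != len(term_b):
--         return False
--
--     if existing_correspondence is None:
--         existing_correspondence = {}
--
--     chords_a = set(chord for component in term_a for chord in component)
--     chords_b = set(chord for component in term_b for chord in component)
--
--     unmatched_a = chords_a - set(existing_correspondence.keys())
--     unmatched_b = chords_b - set(existing_correspondence.values())
--
--     if len(unmatched_a) != len(unmatched_b):
--         return False
--
--     unmatched_a_sorted = sorted(unmatched_a)
--     unmatched_b_sorted = sorted(unmatched_b)
--
--     for correspondence_attempt in itertools.permutations(unmatched_b_sorted):
--         test_correspondence = existing_correspondence.copy()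
--         for chord_idx, chord_a in enumerate(unmatched_a_sorted):
--             test_correspondence[chord_a] = correspondence_attempt[chord_idx]
--
--         correspondence_valid = True
--         for comp_a, comp_b in zip(term_a, term_b):
--             mapped_component_a = [test_correspondence[chord] for chord in comp_a]
--             if find_canonical_cyclic_form(mapped_component_a) != find_canonical_cyclic_form(comp_b):
--                 correspondence_valid = False
--                 break
--
--         if correspondence_valid:
--             return True
--
--     return False
-- ===== SOURCE B (Python) =====
-- def find_canonical_cyclic_form(diagram):
--     if not diagram:
--         return []
--     all_representations = []
--     diagram_length = len(diagram)
--     for shift_amount in range(diagram_length):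
--         shifted = diagram[shift_amount:] + diagram[:shift_amount]
--         all_representations.append(tuple(shifted))
--     mirror_image = diagram[::-1]
--     for shift_amount in range(diagram_length):
--         shifted_mirror = mirror_image[shift_amount:] + mirror_image[:shift_amount]
--         all_representations.append(tuple(shifted_mirror))
--     return list(min(all_representations))
--
--
-- def check_term_isomorphism(term_a, term_b, existing_correspondence=None):
--     """Backtracking search over chord assignments with early pruning:
--     a component pair is checked as soon as all its chords are assigned,
--     and each comp_b's canonical form is computed once up front."""
--     if len(term_a) != len(term_b):
--         return False
--     mapping = dict(existing_correspondence) if existing_correspondence else {}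
--     chords_a = set(c for comp in term_a for c in comp)
--     chords_b = set(c for comp in term_b for c in comp)
--     unmatched_a = sorted(chords_a - set(mapping.keys()))
--     unmatched_b = sorted(chords_b - set(mapping.values()))
--     if len(unmatched_a) != len(unmatched_b):
--         return False
--     targets = [(comp_a, find_canonical_cyclic_form(comp_b))
--                for comp_a, comp_b in zip(term_a, term_b)]
--
--     def consistent(assignment):
--         for comp_a, canon_b in targets:
--             if all(c in assignment for c in comp_a):
--                 if find_canonical_cyclic_form([assignment[c] for c in comp_a]) != canon_b:
--                     return False
--         return True
--
--     def solve(assignment, rest_a, rest_b):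
--         if not consistent(assignment):
--             return False
--         if not rest_a:
--             return True
--         a = rest_a[0]
--         return any(solve({**assignment, a: rest_b[i]},
--                          rest_a[1:], rest_b[:i] + rest_b[i + 1:])
--                    for i in range(len(rest_b)))
--
--     return solve(mapping, unmatched_a, unmatched_b)
-- ===== Notes on version B (the rewrite author's own statement) =====
-- stated objective: alternative
-- what changed: Replaces A's exhaustive scan over all n! chord permutations (re-canonicalising every comp_b each time) with a backtracking search that assigns one chord at a time, prunes as soon as a fully-assigned component pair mismatches, and canonicalises each comp_b once up front.
import Mathlib
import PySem

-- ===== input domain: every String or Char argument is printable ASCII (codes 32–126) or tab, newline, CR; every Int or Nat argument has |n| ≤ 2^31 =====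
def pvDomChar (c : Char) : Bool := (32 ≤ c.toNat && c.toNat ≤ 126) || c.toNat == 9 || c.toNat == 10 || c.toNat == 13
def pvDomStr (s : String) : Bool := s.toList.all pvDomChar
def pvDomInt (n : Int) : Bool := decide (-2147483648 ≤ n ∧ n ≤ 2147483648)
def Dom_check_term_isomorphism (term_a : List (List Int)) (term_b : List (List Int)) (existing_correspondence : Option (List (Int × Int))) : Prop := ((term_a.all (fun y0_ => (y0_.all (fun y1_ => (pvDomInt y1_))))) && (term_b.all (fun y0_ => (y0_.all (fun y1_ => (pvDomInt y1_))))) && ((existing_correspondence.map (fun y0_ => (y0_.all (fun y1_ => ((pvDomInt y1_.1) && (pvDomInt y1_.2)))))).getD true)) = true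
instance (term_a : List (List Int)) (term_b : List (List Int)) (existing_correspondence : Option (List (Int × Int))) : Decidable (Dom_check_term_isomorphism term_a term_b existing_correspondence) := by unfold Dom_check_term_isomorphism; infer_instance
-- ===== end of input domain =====

-- B replaces A's scan over all chord permutations by a backtracking search that checks a
-- component pair as soon as all its chords are assigned, and canonicalises each comp_b once
-- (objective: alternative; return value proved equal on every input).

-- ===== PORT A =====
-- shared helper of Source A and Source B (both files contain it verbatim).
-- diagram[::-1] is ported via PySem.List.slice?; min(nonempty list of tuples) via PySem.List.min?
-- (the list of representations is nonempty here, so min? is some and .getD [] is exact).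
def find_canonical_cyclic_form (diagram : List Int) : List Int :=
  if diagram = [] then []
  else
    let reps1 := (List.range diagram.length).map (fun s =>
      PySem.List.slice diagram (some (s : Int)) none ++ PySem.List.slice diagram none (some (s : Int)))
    let mirror := (PySem.List.slice? diagram none none (-1)).getD []
    let reps := reps1 ++ (List.range diagram.length).map (fun s =>
      PySem.List.slice mirror (some (s : Int)) none ++ PySem.List.slice mirror none (some (s : Int)))
    (PySem.List.min? reps (fun x => x)).getD []

-- test_correspondence[chord] and correspondence_attempt[chord_idx] always hit existing keys /
-- in-range indices in A, so Dict.getD / pyGetD with default 0 are exact.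
def check_term_isomorphism (term_a : List (List Int)) (term_b : List (List Int)) (existing_correspondence : Option (List (Int × Int))) : Bool :=
  if term_a.length ≠ term_b.length then false
  else
    let ec : PySem.Dict Int Int :=
      match existing_correspondence with
      | none => PySem.Dict.empty
      | some l => PySem.Dict.ofList l
    let chords_a : PySem.Set Int := PySem.Set.ofList term_a.flatten
    let chords_b : PySem.Set Int := PySem.Set.ofList term_b.flatten
    let ua := PySem.Set.diff chords_a (PySem.Set.ofList ec.keys)
    let ub := PySem.Set.diff chords_b (PySem.Set.ofList ec.values)
    if ua.length ≠ ub.length then false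
    else
      let uas := PySem.List.sorted ua (fun x => x) false
      let ubs := PySem.List.sorted ub (fun x => x) false
      (PySem.List.permutations ubs ubs.length).any (fun p =>
        let t := (PySem.List.enumerate uas).foldl
          (fun d ia => d.insert ia.2 (PySem.List.pyGetD p ia.1 0)) ec
        (term_a.zip term_b).all (fun pr =>
          find_canonical_cyclic_form (pr.1.map (fun c => t.getD c 0))
            == find_canonical_cyclic_form pr.2))

-- ===== PORT B =====
def altConsistent (targets : List (List Int × List Int)) (d : PySem.Dict Int Int) : Bool :=
  targets.all (fun pr =>
    if pr.1.all (fun c => d.contains c) then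
      find_canonical_cyclic_form (pr.1.map (fun c => d.getD c 0)) == pr.2
    else true)

def altSolve (targets : List (List Int × List Int)) :
    List Int → PySem.Dict Int Int → List Int → Bool
  | [], d, _rb => if altConsistent targets d then true else false
  | a :: ra', d, rb =>
    if altConsistent targets d then
      (List.range rb.length).any (fun i =>
        altSolve targets ra' (d.insert a (rb.getD i 0)) (rb.eraseIdx i))
    else false

def check_term_isomorphism_alt (term_a : List (List Int)) (term_b : List (List Int)) (existing_correspondence : Option (List (Int × Int))) : Bool :=
  if term_a.length ≠ term_b.length then false
  else
    let m : PySem.Dict Int Int :=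
      match existing_correspondence with
      | none => PySem.Dict.empty
      | some l => PySem.Dict.ofList l
    let chords_a : PySem.Set Int := PySem.Set.ofList term_a.flatten
    let chords_b : PySem.Set Int := PySem.Set.ofList term_b.flatten
    let unmatched_a := PySem.List.sorted (PySem.Set.diff chords_a (PySem.Set.ofList m.keys)) (fun x => x) false
    let unmatched_b := PySem.List.sorted (PySem.Set.diff chords_b (PySem.Set.ofList m.values)) (fun x => x) false
    if unmatched_a.length ≠ unmatched_b.length then false
    else
      let targets := (term_a.zip term_b).map (fun pr => (pr.1, find_canonical_cyclic_form pr.2))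
      altSolve targets unmatched_a m unmatched_b

-- ===== PRECONDITION & SPEC =====
def Spec_check_term_isomorphism (term_a : List (List Int)) (term_b : List (List Int)) (existing_correspondence : Option (List (Int × Int))) (out : Bool) : Prop := out = check_term_isomorphism_alt term_a term_b existing_correspondence
instance (term_a : List (List Int)) (term_b : List (List Int)) (existing_correspondence : Option (List (Int × Int))) (out : Bool) : Decidable (Spec_check_term_isomorphism term_a term_b existing_correspondence out) := by unfold Spec_check_term_isomorphism; infer_instance

-- ===== CLAIM (what is proved, stated in full; the proofs are below) =====
def Claim_equal_check_term_isomorphism : Prop := ∀ (term_a : List (List Int)) (term_b : List (List Int)) (existing_correspondence : Option (List (Int × Int))), Dom_check_term_isomorphism term_a term_b existing_correspondence → Spec_check_term_isomorphism term_a term_b existing_correspondence (check_term_isomorphism term_a term_b existing_correspondence)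

-- ===== LEMMAS AND PROOFS =====

-- the dict built from a prefix of assignments, and the full per-pair check (proof-only helpers)
def extendZip (d : PySem.Dict Int Int) (ra p : List Int) : PySem.Dict Int Int :=
  (ra.zip p).foldl (fun d ab => d.insert ab.1 ab.2) d

def fullCheck (targets : List (List Int × List Int)) (d : PySem.Dict Int Int) : Bool :=
  targets.all (fun pr =>
    find_canonical_cyclic_form (pr.1.map (fun c => d.getD c 0)) == pr.2)

theorem extendZip_nil (d : PySem.Dict Int Int) (p : List Int) : extendZip d [] p = d := rfl

theorem extendZip_cons (d : PySem.Dict Int Int) (a b : Int) (ra p : List Int) :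
    extendZip d (a :: ra) (b :: p) = extendZip (d.insert a b) ra p := rfl

theorem getD_extendZip (ra : List Int) :
    ∀ (d : PySem.Dict Int Int) (p : List Int) (c : Int),
    d.contains c = true → ra.Nodup → (∀ a ∈ ra, d.contains a = false) →
    (extendZip d ra p).getD c 0 = d.getD c 0 := by
  induction ra with
  | nil => intro d p c _ _ _; rfl
  | cons a ra' ih =>
    intro d p c hc hnd hdisj
    cases p with
    | nil => rfl
    | cons b p' =>
      rw [extendZip_cons]
      have hca : c ≠ a := by
        intro h; rw [h] at hc
        exact absurd hc (by simp [hdisj a (by simp)])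
      have h1 : (d.insert a b).contains c = true := by
        rw [PySem.Dict.contains_insert]; simp [hc]
      have h2 : ∀ a' ∈ ra', (d.insert a b).contains a' = false := by
        intro a' ha'
        rw [PySem.Dict.contains_insert]
        have : a' ≠ a := by
          intro h; exact (List.nodup_cons.mp hnd).1 (h ▸ ha')
        simp [this, hdisj a' (by simp [ha'])]
      rw [ih (d.insert a b) p' c h1 (List.nodup_cons.mp hnd).2 h2,
          PySem.Dict.getD_insert_of_ne d b 0 hca]

theorem map_getD_extendZip (l : List Int) (d : PySem.Dict Int Int) (ra p : List Int)
    (hl : ∀ c ∈ l, d.contains c = true) (hnd : ra.Nodup)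
    (hdisj : ∀ a ∈ ra, d.contains a = false) :
    l.map (fun c => (extendZip d ra p).getD c 0) = l.map (fun c => d.getD c 0) :=
  List.map_congr_left (fun c hc => getD_extendZip ra d p c (hl c hc) hnd hdisj)

theorem altConsistent_of_fullCheck (targets : List (List Int × List Int))
    (d : PySem.Dict Int Int) (ra p : List Int) (hnd : ra.Nodup)
    (hdisj : ∀ a ∈ ra, d.contains a = false)
    (hfull : fullCheck targets (extendZip d ra p) = true) :
    altConsistent targets d = true := by
  rw [altConsistent, List.all_eq_true]
  intro pr hpr
  by_cases hcov : pr.1.all (fun c => d.contains c) = true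
  · simp only [hcov, if_true]
    have := (List.all_eq_true.mp hfull) pr hpr
    rwa [map_getD_extendZip pr.1 d ra p (fun c hc => (List.all_eq_true.mp hcov) c hc) hnd hdisj] at this
  · simp [hcov]

theorem fullCheck_false_of_not_consistent (targets : List (List Int × List Int))
    (d : PySem.Dict Int Int) (ra p : List Int) (hnd : ra.Nodup)
    (hdisj : ∀ a ∈ ra, d.contains a = false)
    (hcons : altConsistent targets d = false) :
    fullCheck targets (extendZip d ra p) = false := by
  by_contra h
  have hfull : fullCheck targets (extendZip d ra p) = true := by
    cases hf : fullCheck targets (extendZip d ra p) with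
    | false => exact absurd hf h
    | true => rfl
  rw [altConsistent_of_fullCheck targets d ra p hnd hdisj hfull] at hcons
  exact Bool.true_eq_false.mp hcons

theorem all_congr_mem {α : Type} (l : List α) (f g : α → Bool)
    (h : ∀ x ∈ l, f x = g x) : l.all f = l.all g := by
  induction l with
  | nil => rfl
  | cons x t ih =>
    simp only [List.all_cons, h x (by simp),
      ih (fun y hy => h y (by simp [hy]))]

theorem altConsistent_eq_fullCheck (targets : List (List Int × List Int))
    (d : PySem.Dict Int Int)
    (hcov : ∀ pr ∈ targets, ∀ c ∈ pr.1, d.contains c = true) :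
    altConsistent targets d = fullCheck targets d := by
  rw [altConsistent, fullCheck]
  refine all_congr_mem _ _ _ (fun pr hpr => ?_)
  have : pr.1.all (fun c => d.contains c) = true :=
    List.all_eq_true.mpr (fun c hc => hcov pr hpr c hc)
  simp [this]

theorem permutations_succ {α : Type} (rb : List α) (n : Nat) :
    PySem.List.permutations rb (n + 1)
      = (List.range rb.length).flatMap (fun i =>
          match rb[i]? with
          | none => []
          | some x => (PySem.List.permutations (rb.eraseIdx i) n).map (x :: ·)) := by
  rw [PySem.List.permutations]; rfl

theorem main_lemma (targets : List (List Int × List Int)) (ra : List Int) :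
    ∀ (d : PySem.Dict Int Int) (rb : List Int),
    ra.Nodup → (∀ a ∈ ra, d.contains a = false) →
    (∀ pr ∈ targets, ∀ c ∈ pr.1, d.contains c = true ∨ c ∈ ra) →
    (PySem.List.permutations rb ra.length).any
        (fun p => fullCheck targets (extendZip d ra p))
      = altSolve targets ra d rb := by
  induction ra with
  | nil =>
    intro d rb _ _ hcov
    have hcov' : ∀ pr ∈ targets, ∀ c ∈ pr.1, d.contains c = true := by
      intro pr hpr c hc
      rcases hcov pr hpr c hc with h | h
      · exact h
      · exact absurd h (List.not_mem_nil)
    simp only [List.length_nil, PySem.List.permutations_zero, List.any_cons,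
      List.any_nil, Bool.or_false, extendZip_nil, altSolve,
      ← altConsistent_eq_fullCheck targets d hcov']
    cases altConsistent targets d <;> rfl
  | cons a ra' ih =>
    intro d rb hnd hdisj hcov
    rw [List.length_cons, permutations_succ]
    by_cases hcons : altConsistent targets d = true
    · -- consistent: unfold one level and use the IH for each choice of i
      rw [List.any_flatMap,
        PySem.List.any_congr_mem
          (g := fun i => altSolve targets ra' (d.insert a (rb.getD i 0)) (rb.eraseIdx i)) ?hstep]
      · simp [altSolve, hcons]
      case hstep =>
        intro i hi
        have hi' : i < rb.length := List.mem_range.mp hi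
        have hget : rb[i]? = some rb[i] := List.getElem?_eq_getElem hi'
        have hgetD : rb.getD i 0 = rb[i] := List.getD_eq_getElem rb 0 hi'
        simp only [hget, List.any_map, hgetD]
        have hnd' : ra'.Nodup := (List.nodup_cons.mp hnd).2
        have hdisj' : ∀ a' ∈ ra', (d.insert a rb[i]).contains a' = false := by
          intro a' ha'
          rw [PySem.Dict.contains_insert]
          have hne : a' ≠ a := fun h => (List.nodup_cons.mp hnd).1 (h ▸ ha')
          simp [hne, hdisj a' (by simp [ha'])]
        have hcov' : ∀ pr ∈ targets, ∀ c ∈ pr.1,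
            (d.insert a rb[i]).contains c = true ∨ c ∈ ra' := by
          intro pr hpr c hc
          rcases hcov pr hpr c hc with h | h
          · left; rw [PySem.Dict.contains_insert]; simp [h]
          · rcases List.mem_cons.mp h with h | h
            · left; rw [PySem.Dict.contains_insert]; simp [h]
            · right; exact h
        rw [← ih (d.insert a rb[i]) (rb.eraseIdx i) hnd' hdisj' hcov']
        rfl
    · -- inconsistent: both sides are false
      have hcons' : altConsistent targets d = false := by
        cases h : altConsistent targets d with
        | false => rfl
        | true => exact absurd h hcons
      have hrhs : altSolve targets (a :: ra') d rb = false := by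
        simp [altSolve, hcons']
      rw [hrhs, List.any_eq_false]
      intro p _
      simp [fullCheck_false_of_not_consistent targets d (a :: ra') p hnd hdisj hcons']

theorem enumFold (p : List Int) (uas : List Int) :
    ∀ (n : Nat) (d : PySem.Dict Int Int), n + uas.length ≤ p.length →
    (PySem.List.enumerate uas (n : Int)).foldl
        (fun d ia => d.insert ia.2 (PySem.List.pyGetD p ia.1 0)) d
      = extendZip d uas (p.drop n) := by
  induction uas with
  | nil => intro n d _; rfl
  | cons a tl ih =>
    intro n d hle
    have hn : n < p.length := by simp at hle; omega
    have hdrop : p.drop n = p[n] :: p.drop (n + 1) := List.drop_eq_getElem_cons hn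
    have hget : PySem.List.pyGetD p (n : Int) 0 = p.getD n 0 := PySem.List.pyGetD_natCast p n 0
    have hgetD : p.getD n 0 = p[n] := List.getD_eq_getElem p 0 hn
    simp only [PySem.List.enumerate, List.foldl_cons, hget, hgetD, hdrop, extendZip_cons]
    have : ((n : Int) + 1) = ((n + 1 : Nat) : Int) := by push_cast; ring
    rw [this, ih (n + 1) (d.insert a p[n]) (by simp at hle ⊢; omega)]

-- everything after the dict is built depends on the input only through the dict m
theorem tail_eq (ta tb : List (List Int)) (m : PySem.Dict Int Int) :
    (if (PySem.Set.diff (PySem.Set.ofList ta.flatten) (PySem.Set.ofList m.keys)).length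
        ≠ (PySem.Set.diff (PySem.Set.ofList tb.flatten) (PySem.Set.ofList m.values)).length
     then false
     else
       (PySem.List.permutations
           (PySem.List.sorted (PySem.Set.diff (PySem.Set.ofList tb.flatten) (PySem.Set.ofList m.values)) (fun x => x) false)
           (PySem.List.sorted (PySem.Set.diff (PySem.Set.ofList tb.flatten) (PySem.Set.ofList m.values)) (fun x => x) false).length).any
         (fun p =>
           (ta.zip tb).all (fun pr =>
             (find_canonical_cyclic_form (pr.1.map (fun c =>
               ((PySem.List.enumerate (PySem.List.sorted (PySem.Set.diff (PySem.Set.ofList ta.flatten) (PySem.Set.ofList m.keys)) (fun x => x) false)).foldl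
                 (fun d ia => d.insert ia.2 (PySem.List.pyGetD p ia.1 0)) m).getD c 0)))
               == find_canonical_cyclic_form pr.2)))
    = (if (PySem.List.sorted (PySem.Set.diff (PySem.Set.ofList ta.flatten) (PySem.Set.ofList m.keys)) (fun x => x) false).length
          ≠ (PySem.List.sorted (PySem.Set.diff (PySem.Set.ofList tb.flatten) (PySem.Set.ofList m.values)) (fun x => x) false).length
       then false
       else
         altSolve ((ta.zip tb).map (fun pr => (pr.1, find_canonical_cyclic_form pr.2)))
           (PySem.List.sorted (PySem.Set.diff (PySem.Set.ofList ta.flatten) (PySem.Set.ofList m.keys)) (fun x => x) false)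
           m
           (PySem.List.sorted (PySem.Set.diff (PySem.Set.ofList tb.flatten) (PySem.Set.ofList m.values)) (fun x => x) false)) := by
  set ua : PySem.Set Int :=
    PySem.Set.diff (PySem.Set.ofList ta.flatten) (PySem.Set.ofList m.keys) with hua
  set ub : PySem.Set Int :=
    PySem.Set.diff (PySem.Set.ofList tb.flatten) (PySem.Set.ofList m.values) with hub
  set uas := PySem.List.sorted ua (fun x => x) false with huas
  set ubs := PySem.List.sorted ub (fun x => x) false with hubs
  have hlua : uas.length = ua.length := PySem.List.length_sorted ua (fun x => x) false
  have hlub : ubs.length = ub.length := PySem.List.length_sorted ub (fun x => x) false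
  by_cases hg : ua.length ≠ ub.length
  · have hg' : uas.length ≠ ubs.length := by rw [hlua, hlub]; exact hg
    rw [if_pos hg, if_pos hg']
  · have hgeq : ua.length = ub.length := by omega
    have hseq : uas.length = ubs.length := by rw [hlua, hlub, hgeq]
    rw [if_neg hg, if_neg (by omega : ¬ uas.length ≠ ubs.length)]
    set targets := (ta.zip tb).map (fun pr => (pr.1, find_canonical_cyclic_form pr.2)) with htg
    have hnd : uas.Nodup := by
      have : ua.Nodup := PySem.Set.nodup_diff _ _ (PySem.Set.nodup_ofList ta.flatten)
      exact ((PySem.List.sorted_perm ua (fun x => x) false).nodup_iff).mpr this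
    have hdisj : ∀ a ∈ uas, m.contains a = false := by
      intro a ha
      have hmem : a ∈ ua := (PySem.List.mem_sorted ua (fun x => x) false a).mp ha
      have hnk : a ∉ PySem.Set.ofList m.keys := ((PySem.Set.mem_diff _ _ _).mp hmem).2
      have hk : a ∉ m.keys := fun h => hnk ((PySem.Set.mem_ofList _ _).mpr h)
      cases hc : m.contains a with
      | false => rfl
      | true => exact absurd ((PySem.Dict.contains_iff_mem_keys _ _).mp hc) hk
    have hcov : ∀ pr ∈ targets, ∀ c ∈ pr.1, m.contains c = true ∨ c ∈ uas := by
      intro pr hpr c hc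
      rw [htg] at hpr
      rcases List.mem_map.mp hpr with ⟨⟨x, y⟩, hq, heq⟩
      subst heq
      have hx : x ∈ ta := (List.of_mem_zip hq).1
      have hcfa : c ∈ ta.flatten := List.mem_flatten.mpr ⟨x, hx, hc⟩
      cases hmc : m.contains c with
      | true => exact Or.inl rfl
      | false =>
        right
        rw [huas]
        rw [PySem.List.mem_sorted _ (fun x => x) false c, hua]
        refine (PySem.Set.mem_diff _ _ _).mpr ⟨(PySem.Set.mem_ofList _ _).mpr hcfa, fun h => ?_⟩
        have : c ∈ m.keys := (PySem.Set.mem_ofList _ _).mp h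
        rw [(PySem.Dict.contains_iff_mem_keys _ _).mpr this] at hmc
        exact Bool.true_eq_false.mp hmc
    rw [show ubs.length = uas.length from hseq.symm]
    rw [← main_lemma targets uas m ubs hnd hdisj hcov]
    refine PySem.List.any_congr_mem (fun p hp => ?_)
    have hplen : p.length = uas.length := PySem.List.length_of_mem_permutations hp
    have h0 : (0 : Nat) + uas.length ≤ p.length := by omega
    have hfold := enumFold p uas 0 m h0
    simp only [List.drop_zero] at hfold
    rw [show ((0 : Nat) : Int) = (0 : Int) from rfl] at hfold
    rw [hfold, fullCheck, htg, List.all_map]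
    rfl

-- ===== VERDICT (by name: the statement is the Claim_ definition above) =====
theorem check_term_isomorphism_spec : Claim_equal_check_term_isomorphism := by
  intro ta tb ec _
  unfold Spec_check_term_isomorphism check_term_isomorphism check_term_isomorphism_alt
  by_cases hlen : ta.length ≠ tb.length
  · rw [if_pos hlen, if_pos hlen]
  · rw [if_neg hlen, if_neg hlen]
    cases ec with
    | none => exact tail_eq ta tb PySem.Dict.empty
    | some l => exact tail_eq ta tb (PySem.Dict.ofList l)
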